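-- pv_equiv track=rewrite | github.com/jithan-png/scout | backend/services/scoring_service.py | _type_category
-- ===== SOURCE A (Python) =====
-- from typing import List, Dict, Any, Optional
--
-- def _type_category(project: Dict[str, Any]) -> str:
--     tags = [t.lower() for t in project.get("tags", [])]
--     if "single_family" in tags:  return "single_family"
--     if "duplex" in tags:         return "duplex"
--     if "triplex" in tags:        return "triplex"
--     if "fourplex" in tags:       return "fourplex"
--     if "sixplex" in tags:        return "sixplex"
--     if "townhome" in tags:       return "townhome"
--     if any(t in tags for t in ["apartment", "condo", "multifamily"]): return "apartment"
--     if "commercial" in tags:     return "commercial"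
--     if "industrial" in tags:     return "industrial"
--     if "renovation" in tags:     return "renovation"
--     return "default"
-- ===== SOURCE B (Python) =====
-- _RANK = {
--     "single_family": (0, "single_family"),
--     "duplex": (1, "duplex"),
--     "triplex": (2, "triplex"),
--     "fourplex": (3, "fourplex"),
--     "sixplex": (4, "sixplex"),
--     "townhome": (5, "townhome"),
--     "apartment": (6, "apartment"),
--     "condo": (6, "apartment"),
--     "multifamily": (6, "apartment"),
--     "commercial": (7, "commercial"),
--     "industrial": (8, "industrial"),
--     "renovation": (9, "renovation"),
-- }
--
-- def _type_category(project):
--     best_rank, best_cat = 10, "default"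
--     for t in project.get("tags", []):
--         r, c = _RANK.get(t.lower(), (10, "default"))
--         if r < best_rank:
--             best_rank, best_cat = r, c
--     return best_cat
-- ===== Notes on version B (the rewrite author's own statement) =====
-- stated objective: alternative
-- what changed: Instead of A's priority-ordered membership tests over the whole tag list per category, B makes a single pass over the tags, looking each tag up in a keyword-to-(rank,category) map and keeping the minimum-rank category seen.
import Mathlib
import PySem

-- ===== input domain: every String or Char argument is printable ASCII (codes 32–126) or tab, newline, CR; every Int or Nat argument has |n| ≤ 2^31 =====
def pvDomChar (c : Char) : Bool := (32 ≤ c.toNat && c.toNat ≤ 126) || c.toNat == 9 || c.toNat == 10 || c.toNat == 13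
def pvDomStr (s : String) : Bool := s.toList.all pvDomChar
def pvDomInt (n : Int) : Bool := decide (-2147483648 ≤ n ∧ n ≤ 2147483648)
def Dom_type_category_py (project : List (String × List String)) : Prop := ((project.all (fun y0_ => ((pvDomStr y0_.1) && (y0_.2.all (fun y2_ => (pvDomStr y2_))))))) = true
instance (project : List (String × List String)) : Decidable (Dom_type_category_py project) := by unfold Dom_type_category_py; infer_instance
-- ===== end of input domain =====

-- B replaces A's per-category membership tests over the whole tag list by a single pass over the
-- tags that keeps the minimum-rank (highest-priority) category via a keyword→(rank, category) map.

-- ===== PORT A =====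
def type_category_py (project : List (String × List String)) : String :=
  let tags := (((project.find? (fun p => p.1 == "tags")).map Prod.snd).getD []).map PySem.Str.lower
  if tags.contains "single_family" then "single_family"
  else if tags.contains "duplex" then "duplex"
  else if tags.contains "triplex" then "triplex"
  else if tags.contains "fourplex" then "fourplex"
  else if tags.contains "sixplex" then "sixplex"
  else if tags.contains "townhome" then "townhome"
  else if ["apartment", "condo", "multifamily"].any (fun t => tags.contains t) then "apartment"
  else if tags.contains "commercial" then "commercial"
  else if tags.contains "industrial" then "industrial"
  else if tags.contains "renovation" then "renovation"
  else "default"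

-- ===== PORT B =====
def pvRankTable : PySem.Dict String (Nat × String) :=
  PySem.Dict.ofList
    [ ("single_family", (0, "single_family")),
      ("duplex", (1, "duplex")),
      ("triplex", (2, "triplex")),
      ("fourplex", (3, "fourplex")),
      ("sixplex", (4, "sixplex")),
      ("townhome", (5, "townhome")),
      ("apartment", (6, "apartment")),
      ("condo", (6, "apartment")),
      ("multifamily", (6, "apartment")),
      ("commercial", (7, "commercial")),
      ("industrial", (8, "industrial")),
      ("renovation", (9, "renovation")) ]

def type_category_py_alt (project : List (String × List String)) : String :=
  let tags := ((project.find? (fun p => p.1 == "tags")).map Prod.snd).getD []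
  let best := tags.foldl
    (fun b t =>
      let rc := PySem.Dict.getD pvRankTable (PySem.Str.lower t) (10, "default")
      if rc.1 < b.1 then rc else b)
    ((10 : Nat), "default")
  best.2

-- ===== PRECONDITION & SPEC =====
def Spec_type_category_py (project : List (String × List String)) (out : String) : Prop := out = type_category_py_alt project
instance (project : List (String × List String)) (out : String) : Decidable (Spec_type_category_py project out) := by unfold Spec_type_category_py; infer_instance

-- ===== CLAIM (what is proved, stated in full; the proofs are below) =====
def Claim_equal_type_category_py : Prop := ∀ (project : List (String × List String)), Dom_type_category_py project → Spec_type_category_py project (type_category_py project)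

-- ===== LEMMAS AND PROOFS =====
-- rank of a (lowercased) tag: the first component the table assigns, 10 if absent
def pvRankFun (t : String) : Nat :=
  if t = "single_family" then 0 else if t = "duplex" then 1 else if t = "triplex" then 2
  else if t = "fourplex" then 3 else if t = "sixplex" then 4 else if t = "townhome" then 5
  else if t = "apartment" ∨ t = "condo" ∨ t = "multifamily" then 6
  else if t = "commercial" then 7 else if t = "industrial" then 8 else if t = "renovation" then 9
  else 10

-- category named by a rank
def pvCat : Nat → String
  | 0 => "single_family" | 1 => "duplex" | 2 => "triplex" | 3 => "fourplex"
  | 4 => "sixplex" | 5 => "townhome" | 6 => "apartment" | 7 => "commercial"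
  | 8 => "industrial" | 9 => "renovation" | _ => "default"

theorem pv_rankPair (t : String) :
    PySem.Dict.getD pvRankTable t (10, "default") = (pvRankFun t, pvCat (pvRankFun t)) := by
  unfold pvRankFun
  by_cases h0 : t = "single_family"; · subst h0; decide
  by_cases h1 : t = "duplex"; · subst h1; decide
  by_cases h2 : t = "triplex"; · subst h2; decide
  by_cases h3 : t = "fourplex"; · subst h3; decide
  by_cases h4 : t = "sixplex"; · subst h4; decide
  by_cases h5 : t = "townhome"; · subst h5; decide
  by_cases h6 : t = "apartment"; · subst h6; decide
  by_cases h7 : t = "condo"; · subst h7; decide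
  by_cases h8 : t = "multifamily"; · subst h8; decide
  by_cases h9 : t = "commercial"; · subst h9; decide
  by_cases h10 : t = "industrial"; · subst h10; decide
  by_cases h11 : t = "renovation"; · subst h11; decide
  have g0 : ("single_family" == t) = false := by simpa using Ne.symm h0
  have g1 : ("duplex" == t) = false := by simpa using Ne.symm h1
  have g2 : ("triplex" == t) = false := by simpa using Ne.symm h2
  have g3 : ("fourplex" == t) = false := by simpa using Ne.symm h3
  have g4 : ("sixplex" == t) = false := by simpa using Ne.symm h4
  have g5 : ("townhome" == t) = false := by simpa using Ne.symm h5
  have g6 : ("apartment" == t) = false := by simpa using Ne.symm h6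
  have g7 : ("condo" == t) = false := by simpa using Ne.symm h7
  have g8 : ("multifamily" == t) = false := by simpa using Ne.symm h8
  have g9 : ("commercial" == t) = false := by simpa using Ne.symm h9
  have g10 : ("industrial" == t) = false := by simpa using Ne.symm h10
  have g11 : ("renovation" == t) = false := by simpa using Ne.symm h11
  simp [pvRankTable, PySem.Dict.getD, PySem.Dict.ofList, PySem.Dict.update, PySem.Dict.empty,
        PySem.Dict.insert, PySem.Dict.get?, List.find?, h0, h1, h2, h3, h4, h5, h6, h7, h8, h9, h10, h11,
        g0, g1, g2, g3, g4, g5, g6, g7, g8, g9, g10, g11, pvCat]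

-- exhaustive case split on a string's rank
theorem pv_rank_cases (t : String) :
    (pvRankFun t = 0 ∧ t = "single_family") ∨ (pvRankFun t = 1 ∧ t = "duplex") ∨
    (pvRankFun t = 2 ∧ t = "triplex") ∨ (pvRankFun t = 3 ∧ t = "fourplex") ∨
    (pvRankFun t = 4 ∧ t = "sixplex") ∨ (pvRankFun t = 5 ∧ t = "townhome") ∨
    (pvRankFun t = 6 ∧ (t = "apartment" ∨ t = "condo" ∨ t = "multifamily")) ∨
    (pvRankFun t = 7 ∧ t = "commercial") ∨ (pvRankFun t = 8 ∧ t = "industrial") ∨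
    (pvRankFun t = 9 ∧ t = "renovation") ∨ pvRankFun t = 10 := by
  unfold pvRankFun; split_ifs <;> simp_all

-- the rank-side step of B's fold
def pvG (a : Nat) (t : String) : Nat := if pvRankFun t < a then pvRankFun t else a

theorem pv_fold_pair (raw : List String) :
    ∀ r : Nat,
      raw.foldl (fun b t =>
          if (PySem.Dict.getD pvRankTable (PySem.Str.lower t) (10, "default")).1 < b.1
          then PySem.Dict.getD pvRankTable (PySem.Str.lower t) (10, "default") else b) (r, pvCat r)
        = (raw.foldl (fun a t => pvG a (PySem.Str.lower t)) r,
           pvCat (raw.foldl (fun a t => pvG a (PySem.Str.lower t)) r)) := by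
  induction raw with
  | nil => intro r; rfl
  | cons t raw ih =>
    intro r
    rw [List.foldl_cons, List.foldl_cons]
    have hstep : (if (PySem.Dict.getD pvRankTable (PySem.Str.lower t) (10, "default")).1
          < ((r, pvCat r) : Nat × String).1
        then PySem.Dict.getD pvRankTable (PySem.Str.lower t) (10, "default") else (r, pvCat r))
        = (pvG r (PySem.Str.lower t), pvCat (pvG r (PySem.Str.lower t))) := by
      simp only [pv_rankPair, pvG]
      split_ifs <;> rfl
    rw [hstep]
    exact ih _

theorem pv_fold_pair' (raw : List String) :
    raw.foldl (fun b t =>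
        if (PySem.Dict.getD pvRankTable (PySem.Str.lower t) (10, "default")).1 < b.1
        then PySem.Dict.getD pvRankTable (PySem.Str.lower t) (10, "default") else b)
        ((10 : Nat), "default")
      = (raw.foldl (fun a t => pvG a (PySem.Str.lower t)) 10,
         pvCat (raw.foldl (fun a t => pvG a (PySem.Str.lower t)) 10)) :=
  pv_fold_pair raw 10

theorem pv_fold_spec (L : List String) :
    ∀ a : Nat,
      L.foldl pvG a ≤ a ∧ (∀ t ∈ L, L.foldl pvG a ≤ pvRankFun t) ∧
      (L.foldl pvG a = a ∨ ∃ t ∈ L, pvRankFun t = L.foldl pvG a) := by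
  induction L with
  | nil => intro a; simp
  | cons t L ih =>
    intro a
    obtain ⟨h1, h2, h3⟩ := ih (pvG a t)
    simp only [List.foldl_cons]
    refine ⟨le_trans h1 (by unfold pvG; split_ifs <;> omega), ?_, ?_⟩
    · intro u hu
      rcases List.mem_cons.mp hu with rfl | hu
      · exact le_trans h1 (by unfold pvG; split_ifs <;> omega)
      · exact h2 u hu
    · rcases h3 with h | ⟨u, hu, hru⟩
      · by_cases hlt : pvRankFun t < a
        · exact Or.inr ⟨t, List.mem_cons_self, by rw [h]; unfold pvG; simp [hlt]⟩
        · exact Or.inl (by rw [h]; unfold pvG; simp [hlt])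
      · exact Or.inr ⟨u, List.mem_cons_of_mem _ hu, hru⟩

-- the fold computes rank i when some tag has rank i and none has a smaller one
theorem pv_m_eq (L : List String) (i : Nat) (hi : i < 10)
    (hkw : ∃ t ∈ L, pvRankFun t = i)
    (hlow : ∀ t ∈ L, ¬ pvRankFun t < i) :
    L.foldl pvG 10 = i := by
  obtain ⟨_, hub, hex⟩ := pv_fold_spec L 10
  obtain ⟨u, hu, hru⟩ := hkw
  have h1 : L.foldl pvG 10 ≤ i := hru ▸ hub u hu
  rcases hex with he | ⟨t, ht, hrt⟩
  · omega
  · have := hlow t ht; omega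

theorem pv_m_default (L : List String) (hlow : ∀ t ∈ L, pvRankFun t = 10) :
    L.foldl pvG 10 = 10 := by
  obtain ⟨_, _, hex⟩ := pv_fold_spec L 10
  rcases hex with he | ⟨t, ht, hrt⟩
  · exact he
  · rw [← hrt, hlow t ht]

-- A's branch chain on the lowered tag list is the category of the minimum rank
theorem pv_chain_eq (L : List String) :
    (if L.contains "single_family" then "single_family"
     else if L.contains "duplex" then "duplex"
     else if L.contains "triplex" then "triplex"
     else if L.contains "fourplex" then "fourplex"
     else if L.contains "sixplex" then "sixplex"
     else if L.contains "townhome" then "townhome"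
     else if ["apartment", "condo", "multifamily"].any (fun t => L.contains t) then "apartment"
     else if L.contains "commercial" then "commercial"
     else if L.contains "industrial" then "industrial"
     else if L.contains "renovation" then "renovation"
     else "default")
      = pvCat (L.foldl pvG 10) := by
  split_ifs with h0 h1 h2 h3 h4 h5 h6 h7 h8 h9 <;>
    simp only [List.contains_eq_mem, List.any_cons, List.any_nil, Bool.or_eq_true,
      Bool.or_false, decide_eq_true_eq, not_or] at *
  · have hlow : ∀ t ∈ L, ¬ pvRankFun t < 0 := by
      intro t ht hlt
      rcases pv_rank_cases t with ⟨hj, _⟩ | ⟨hj, _⟩ | ⟨hj, _⟩ | ⟨hj, _⟩ | ⟨hj, _⟩ | ⟨hj, _⟩ | ⟨hj, _⟩ | ⟨hj, _⟩ | ⟨hj, _⟩ | ⟨hj, _⟩ | hj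

      all_goals omega
    rw [pv_m_eq L 0 (by omega) ⟨_, h0, by decide⟩ hlow]
    rfl
  · have hlow : ∀ t ∈ L, ¬ pvRankFun t < 1 := by
      intro t ht hlt
      rcases pv_rank_cases t with ⟨hj, rfl⟩ | ⟨hj, _⟩ | ⟨hj, _⟩ | ⟨hj, _⟩ | ⟨hj, _⟩ | ⟨hj, _⟩ | ⟨hj, _⟩ | ⟨hj, _⟩ | ⟨hj, _⟩ | ⟨hj, _⟩ | hj
      · exact h0 ht
      all_goals omega
    rw [pv_m_eq L 1 (by omega) ⟨_, h1, by decide⟩ hlow]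
    rfl
  · have hlow : ∀ t ∈ L, ¬ pvRankFun t < 2 := by
      intro t ht hlt
      rcases pv_rank_cases t with ⟨hj, rfl⟩ | ⟨hj, rfl⟩ | ⟨hj, _⟩ | ⟨hj, _⟩ | ⟨hj, _⟩ | ⟨hj, _⟩ | ⟨hj, _⟩ | ⟨hj, _⟩ | ⟨hj, _⟩ | ⟨hj, _⟩ | hj
      · exact h0 ht
      · exact h1 ht
      all_goals omega
    rw [pv_m_eq L 2 (by omega) ⟨_, h2, by decide⟩ hlow]
    rfl
  · have hlow : ∀ t ∈ L, ¬ pvRankFun t < 3 := by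
      intro t ht hlt
      rcases pv_rank_cases t with ⟨hj, rfl⟩ | ⟨hj, rfl⟩ | ⟨hj, rfl⟩ | ⟨hj, _⟩ | ⟨hj, _⟩ | ⟨hj, _⟩ | ⟨hj, _⟩ | ⟨hj, _⟩ | ⟨hj, _⟩ | ⟨hj, _⟩ | hj
      · exact h0 ht
      · exact h1 ht
      · exact h2 ht
      all_goals omega
    rw [pv_m_eq L 3 (by omega) ⟨_, h3, by decide⟩ hlow]
    rfl
  · have hlow : ∀ t ∈ L, ¬ pvRankFun t < 4 := by
      intro t ht hlt
      rcases pv_rank_cases t with ⟨hj, rfl⟩ | ⟨hj, rfl⟩ | ⟨hj, rfl⟩ | ⟨hj, rfl⟩ | ⟨hj, _⟩ | ⟨hj, _⟩ | ⟨hj, _⟩ | ⟨hj, _⟩ | ⟨hj, _⟩ | ⟨hj, _⟩ | hj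
      · exact h0 ht
      · exact h1 ht
      · exact h2 ht
      · exact h3 ht
      all_goals omega
    rw [pv_m_eq L 4 (by omega) ⟨_, h4, by decide⟩ hlow]
    rfl
  · have hlow : ∀ t ∈ L, ¬ pvRankFun t < 5 := by
      intro t ht hlt
      rcases pv_rank_cases t with ⟨hj, rfl⟩ | ⟨hj, rfl⟩ | ⟨hj, rfl⟩ | ⟨hj, rfl⟩ | ⟨hj, rfl⟩ | ⟨hj, _⟩ | ⟨hj, _⟩ | ⟨hj, _⟩ | ⟨hj, _⟩ | ⟨hj, _⟩ | hj
      · exact h0 ht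
      · exact h1 ht
      · exact h2 ht
      · exact h3 ht
      · exact h4 ht
      all_goals omega
    rw [pv_m_eq L 5 (by omega) ⟨_, h5, by decide⟩ hlow]
    rfl
  · have hkw : ∃ t ∈ L, pvRankFun t = 6 := by
      rcases h6 with h | h | h
      · exact ⟨_, h, by decide⟩
      · exact ⟨_, h, by decide⟩
      · exact ⟨_, h, by decide⟩
    have hlow : ∀ t ∈ L, ¬ pvRankFun t < 6 := by
      intro t ht hlt
      rcases pv_rank_cases t with ⟨hj, rfl⟩ | ⟨hj, rfl⟩ | ⟨hj, rfl⟩ | ⟨hj, rfl⟩ | ⟨hj, rfl⟩ | ⟨hj, rfl⟩ | ⟨hj, _⟩ | ⟨hj, _⟩ | ⟨hj, _⟩ | ⟨hj, _⟩ | hj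
      · exact h0 ht
      · exact h1 ht
      · exact h2 ht
      · exact h3 ht
      · exact h4 ht
      · exact h5 ht
      all_goals omega
    rw [pv_m_eq L 6 (by omega) hkw hlow]
    rfl
  · have hlow : ∀ t ∈ L, ¬ pvRankFun t < 7 := by
      intro t ht hlt
      rcases pv_rank_cases t with ⟨hj, rfl⟩ | ⟨hj, rfl⟩ | ⟨hj, rfl⟩ | ⟨hj, rfl⟩ | ⟨hj, rfl⟩ | ⟨hj, rfl⟩ | ⟨hj, hk⟩ | ⟨hj, _⟩ | ⟨hj, _⟩ | ⟨hj, _⟩ | hj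
      · exact h0 ht
      · exact h1 ht
      · exact h2 ht
      · exact h3 ht
      · exact h4 ht
      · exact h5 ht
      · rcases hk with rfl | rfl | rfl
        · exact h6.1 ht
        · exact h6.2.1 ht
        · exact h6.2.2 ht
      all_goals omega
    rw [pv_m_eq L 7 (by omega) ⟨_, h7, by decide⟩ hlow]
    rfl
  · have hlow : ∀ t ∈ L, ¬ pvRankFun t < 8 := by
      intro t ht hlt
      rcases pv_rank_cases t with ⟨hj, rfl⟩ | ⟨hj, rfl⟩ | ⟨hj, rfl⟩ | ⟨hj, rfl⟩ | ⟨hj, rfl⟩ | ⟨hj, rfl⟩ | ⟨hj, hk⟩ | ⟨hj, rfl⟩ | ⟨hj, _⟩ | ⟨hj, _⟩ | hj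
      · exact h0 ht
      · exact h1 ht
      · exact h2 ht
      · exact h3 ht
      · exact h4 ht
      · exact h5 ht
      · rcases hk with rfl | rfl | rfl
        · exact h6.1 ht
        · exact h6.2.1 ht
        · exact h6.2.2 ht
      · exact h7 ht
      all_goals omega
    rw [pv_m_eq L 8 (by omega) ⟨_, h8, by decide⟩ hlow]
    rfl
  · have hlow : ∀ t ∈ L, ¬ pvRankFun t < 9 := by
      intro t ht hlt
      rcases pv_rank_cases t with ⟨hj, rfl⟩ | ⟨hj, rfl⟩ | ⟨hj, rfl⟩ | ⟨hj, rfl⟩ | ⟨hj, rfl⟩ | ⟨hj, rfl⟩ | ⟨hj, hk⟩ | ⟨hj, rfl⟩ | ⟨hj, rfl⟩ | ⟨hj, _⟩ | hj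
      · exact h0 ht
      · exact h1 ht
      · exact h2 ht
      · exact h3 ht
      · exact h4 ht
      · exact h5 ht
      · rcases hk with rfl | rfl | rfl
        · exact h6.1 ht
        · exact h6.2.1 ht
        · exact h6.2.2 ht
      · exact h7 ht
      · exact h8 ht
      all_goals omega
    rw [pv_m_eq L 9 (by omega) ⟨_, h9, by decide⟩ hlow]
    rfl
  · have hall : ∀ t ∈ L, pvRankFun t = 10 := by
      intro t ht
      rcases pv_rank_cases t with ⟨hj, rfl⟩ | ⟨hj, rfl⟩ | ⟨hj, rfl⟩ | ⟨hj, rfl⟩ | ⟨hj, rfl⟩ | ⟨hj, rfl⟩ | ⟨hj, hk⟩ | ⟨hj, rfl⟩ | ⟨hj, rfl⟩ | ⟨hj, rfl⟩ | hj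
      · exact absurd ht h0
      · exact absurd ht h1
      · exact absurd ht h2
      · exact absurd ht h3
      · exact absurd ht h4
      · exact absurd ht h5
      · rcases hk with rfl | rfl | rfl
        · exact absurd ht h6.1
        · exact absurd ht h6.2.1
        · exact absurd ht h6.2.2
      · exact absurd ht h7
      · exact absurd ht h8
      · exact absurd ht h9
      · exact hj
    rw [pv_m_default L hall]
    rfl

-- ===== VERDICT (by name: the statement is the Claim_ definition above) =====
theorem type_category_py_spec : Claim_equal_type_category_py := by
  intro project _
  show type_category_py project = type_category_py_alt project
  simp only [type_category_py, type_category_py_alt]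
  rw [pv_fold_pair', ← List.foldl_map (f := PySem.Str.lower) (g := pvG)]
  simpa using pv_chain_eq
    (List.map PySem.Str.lower (((project.find? (fun p => p.1 == "tags")).map Prod.snd).getD []))
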